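-- pv_equiv track=rewrite | github.com/maurergroup/deltascf-aims | deltascf_aims/utils/utils.py | _check_spin_polarised
-- ===== SOURCE A (Python) =====
-- def _check_spin_polarised(lines: list[str]) -> bool:
--     """
--     Check if the FHI-aims calculation was spin polarised.
--
--     Parameters
--     ----------
--     lines : list[str]
--         Lines from the aims.out file
--
--     Returns
--     -------
--     bool
--         Whether the calculation was spin polarised or not
--     """
--     spin_polarised = False
--
--     for line in lines:
--         spl = line.split()
--         if len(spl) == 2:
--             # Don't break the loop if spin polarised calculation is found as if the
--             # keyword is specified again, it is the last one that is used
--             if spl[0] == "spin" and spl[1] == "collinear":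
--                 spin_polarised = True
--
--             if spl[0] == "spin" and spl[1] == "none":
--                 spin_polarised = False
--
--     return spin_polarised
-- ===== SOURCE B (Python) =====
-- def _check_spin_polarised(lines: list[str]) -> bool:
--     """Scan backwards and return at the last effective spin keyword."""
--     for line in reversed(lines):
--         spl = line.split()
--         if spl == ["spin", "collinear"]:
--             return True
--         if spl == ["spin", "none"]:
--             return False
--     return False
-- ===== Notes on version B (the rewrite author's own statement) =====
-- stated objective: simpler
-- what changed: Backward scan with early return at the first (i.e. last-used) spin keyword, instead of toggling a boolean across a full forward scan.
import Mathlib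
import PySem

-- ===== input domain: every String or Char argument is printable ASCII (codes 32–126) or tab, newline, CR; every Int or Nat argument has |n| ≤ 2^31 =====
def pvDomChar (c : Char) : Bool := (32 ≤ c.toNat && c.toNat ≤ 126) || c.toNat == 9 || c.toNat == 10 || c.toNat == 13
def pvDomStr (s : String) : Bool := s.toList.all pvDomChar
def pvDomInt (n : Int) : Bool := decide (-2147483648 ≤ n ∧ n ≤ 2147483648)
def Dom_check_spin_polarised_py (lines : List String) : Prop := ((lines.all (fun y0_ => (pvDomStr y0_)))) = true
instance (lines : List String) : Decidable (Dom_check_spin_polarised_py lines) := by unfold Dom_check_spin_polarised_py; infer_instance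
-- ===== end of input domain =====

-- B scans the lines backwards and returns at the first (i.e. last-used) spin keyword,
-- instead of A's forward scan toggling a boolean; simpler control flow, same values.


-- ===== PORT A =====
-- one loop step of A: len(spl)==2 gate, then the two toggling ifs in source order
def pvStepA (spin_polarised : Bool) (line : String) : Bool :=
  let spl := PySem.Str.split₀ line
  if spl.length = 2 then
    let sp1 := if PySem.List.pyGet? spl 0 = some "spin" ∧ PySem.List.pyGet? spl 1 = some "collinear"
               then true else spin_polarised
    if PySem.List.pyGet? spl 0 = some "spin" ∧ PySem.List.pyGet? spl 1 = some "none"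
    then false else sp1
  else spin_polarised

def check_spin_polarised_py (lines : List String) : Bool :=
  lines.foldl pvStepA false

-- ===== PORT B =====
-- B's loop over reversed(lines), returning at the first match
def pvGoB : List String → Bool
  | [] => false
  | l :: rest =>
    let spl := PySem.Str.split₀ l
    if spl = ["spin", "collinear"] then true
    else if spl = ["spin", "none"] then false
    else pvGoB rest

def check_spin_polarised_py_alt (lines : List String) : Bool :=
  pvGoB lines.reverse

-- ===== PRECONDITION & SPEC =====
def Spec_check_spin_polarised_py (lines : List String) (out : Bool) : Prop := out = check_spin_polarised_py_alt lines
instance (lines : List String) (out : Bool) : Decidable (Spec_check_spin_polarised_py lines out) := by unfold Spec_check_spin_polarised_py; infer_instance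

-- ===== CLAIM (what is proved, stated in full; the proofs are below) =====
def Claim_equal_check_spin_polarised_py : Prop := ∀ (lines : List String), Dom_check_spin_polarised_py lines → Spec_check_spin_polarised_py lines (check_spin_polarised_py lines)

-- ===== LEMMAS AND PROOFS =====

-- A's step, rewritten as B's per-line test falling through to the accumulator
theorem pvStepA_eq (b : Bool) (l : String) :
    pvStepA b l =
      (if PySem.Str.split₀ l = ["spin", "collinear"] then true
       else if PySem.Str.split₀ l = ["spin", "none"] then false
       else b) := by
  unfold pvStepA
  cases h : PySem.Str.split₀ l with
  | nil => simp
  | cons a t =>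
    cases t with
    | nil => simp
    | cons c t2 =>
      cases t2 with
      | nil =>
        simp only [List.length_cons, List.length_nil]
        simp [PySem.List.pyGet?, PySem.List.pyIdx?]
        by_cases h1 : a = "spin" <;> by_cases h2 : c = "collinear" <;>
          by_cases h3 : c = "none" <;> simp_all
      | cons d t3 => simp

theorem pvGoB_cons (l : String) (rest : List String) :
    pvGoB (l :: rest) =
      (if PySem.Str.split₀ l = ["spin", "collinear"] then true
       else if PySem.Str.split₀ l = ["spin", "none"] then false
       else pvGoB rest) := rfl

theorem foldl_eq_goB_reverse (xs : List String) :
    List.foldl pvStepA false xs = pvGoB xs.reverse := by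
  induction xs using List.reverseRecOn with
  | nil => rfl
  | append_singleton ys x ih =>
    rw [List.foldl_append, List.foldl_cons, List.foldl_nil, List.reverse_append]
    simp only [List.reverse_singleton, List.singleton_append]
    rw [pvStepA_eq, ih, pvGoB_cons]

-- ===== VERDICT (by name: the statement is the Claim_ definition above) =====
theorem check_spin_polarised_py_spec : Claim_equal_check_spin_polarised_py := by
  intro lines _
  unfold Spec_check_spin_polarised_py check_spin_polarised_py check_spin_polarised_py_alt
  exact foldl_eq_goB_reverse lines
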